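-- pv_equiv track=rewrite | github.com/rmj2200o5/AOC | 2020/day14.py | findAddresses
-- ===== SOURCE A (Python) =====
-- def findInt(number):
--     number = "".join(number)
--     intNumber = 0
--     for i in range(36):
--         if number[i]=="1":
--             intNumber+=2**(35-i)
--     return intNumber
--
-- def findAddresses(memAddress):
--     if not "X" in memAddress:
--         return [findInt(memAddress)]
--     i = memAddress.index("X")
--     op1 = memAddress.copy()
--     op2 = memAddress.copy()
--     op1[i]="0"
--     op2[i]="1"
--     return findAddresses(op1)+findAddresses(op2)
-- ===== SOURCE B (Python) =====
-- # Same result as A, by iterating bit assignments over the X positions instead of branching recursion.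
-- def findInt(number):
--     number = "".join(number)
--     intNumber = 0
--     for i in range(36):
--         if number[i] == "1":
--             intNumber += 2 ** (35 - i)
--     return intNumber
--
-- def _assign(memAddress, xs, k, m):
--     cur = list(memAddress)
--     for t, i in enumerate(xs):
--         cur[i] = "1" if (m >> (k - 1 - t)) & 1 else "0"
--     return cur
--
-- def findAddresses(memAddress):
--     xs = [i for i, c in enumerate(memAddress) if c == "X"]
--     k = len(xs)
--     return [findInt(_assign(memAddress, xs, k, m)) for m in range(2 ** k)]
-- ===== Notes on version B (the rewrite author's own statement) =====
-- stated objective: alternative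
-- what changed: Replaces the binary branching recursion on the first 'X' with a single pass collecting the X positions followed by an integer loop over all 2^k bit assignments (first X = most significant bit), mapping findInt over the substituted copies.
import Mathlib
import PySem

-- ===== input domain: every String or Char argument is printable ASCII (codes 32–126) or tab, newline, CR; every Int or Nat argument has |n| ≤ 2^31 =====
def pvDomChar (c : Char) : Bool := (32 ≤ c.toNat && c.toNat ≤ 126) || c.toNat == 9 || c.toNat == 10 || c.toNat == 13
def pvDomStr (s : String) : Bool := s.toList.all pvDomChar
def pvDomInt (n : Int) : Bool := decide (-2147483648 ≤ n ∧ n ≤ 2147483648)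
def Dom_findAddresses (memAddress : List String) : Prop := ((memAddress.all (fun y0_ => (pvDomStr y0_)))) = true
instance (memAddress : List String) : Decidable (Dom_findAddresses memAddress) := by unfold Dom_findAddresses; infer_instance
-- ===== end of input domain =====

-- B replaces A's binary branching recursion on the first 'X' by one scan collecting the X positions plus
-- an integer loop over all 2^k bit assignments (first X = most significant); same cost, different shape.

-- ===== PORT A =====
-- findInt: "".join(number) then indexing chars 0..35; cs[i]? is exact where Python returns
-- (Pre_ excludes joined length < 36, where Python's number[i] raises IndexError)
def findInt (number : List String) : Int :=
  let cs := (number.map String.toList).flatten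
  (List.range 36).foldl (fun acc i => if cs[i]? = some '1' then acc + 2 ^ (35 - i) else acc) 0

-- termination helper for the port: replacing the first "X" strictly decreases the count of "X"
theorem count_set_of_index? {l : List String} {i : Nat} (h : PySem.List.index? l "X" = some i)
    (b : String) (hb : b ≠ "X") : (l.set i b).count "X" + 1 = l.count "X" := by
  obtain ⟨pre, suf, rfl, rfl, hpre⟩ := (PySem.List.index?_eq_some_iff _ _ _).1 h
  simp [List.count_append, List.count_eq_zero_of_not_mem hpre, hb]

def findAddresses (memAddress : List String) : List Int :=
  if "X" ∈ memAddress then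
    match hi : PySem.List.index? memAddress "X" with
    | some i =>
        let op1 := memAddress.set i "0"
        let op2 := memAddress.set i "1"
        findAddresses op1 ++ findAddresses op2
    | none => []    -- unreachable: "X" ∈ memAddress
  else
    [findInt memAddress]
termination_by memAddress.count "X"
decreasing_by
  · have := count_set_of_index? hi "0" (by decide); omega
  · have := count_set_of_index? hi "1" (by decide); omega

-- ===== PORT B =====
-- _assign's loop: enumerate(xs) ported as zipIdx (the enumerated indices here are the Nat positions 0..len-1, exact)
def assignBits (memAddress : List String) (xs : List Nat) (k m : Nat) : List String :=
  xs.zipIdx.foldl (fun cur p => cur.set p.1 (if (m >>> (k - 1 - p.2)) % 2 = 1 then "1" else "0")) memAddress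

def findAddresses_alt (memAddress : List String) : List Int :=
  let xs := memAddress.zipIdx.filterMap (fun p => if p.1 = "X" then some p.2 else none)
  let k := xs.length
  (List.range (2 ^ k)).map (fun m => findInt (assignBits memAddress xs k m))

-- ===== PRECONDITION & SPEC =====
-- Pre_ excludes exactly the inputs on which Python A raises IndexError in findInt:
-- those whose joined character length is < 36 (the 'X'→'0'/'1' substitutions preserve that length).
def Pre_findAddresses (memAddress : List String) : Prop :=
  36 ≤ ((memAddress.map (fun s => s.toList.length)).sum)
instance (memAddress : List String) : Decidable (Pre_findAddresses memAddress) := by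
  unfold Pre_findAddresses; infer_instance

def pvWitness_findAddresses : List String :=
  ["X", "0", "1", "X", "000000000000000000000000000000001101"]

def Spec_findAddresses (memAddress : List String) (out : List Int) : Prop := out = findAddresses_alt memAddress
instance (memAddress : List String) (out : List Int) : Decidable (Spec_findAddresses memAddress out) := by unfold Spec_findAddresses; infer_instance

-- ===== CLAIM (what is proved, stated in full; the proofs are below) =====
def Claim_equal_findAddresses : Prop := ∀ (memAddress : List String), Dom_findAddresses memAddress → Pre_findAddresses memAddress → Spec_findAddresses memAddress (findAddresses memAddress)

-- ===== LEMMAS AND PROOFS =====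

-- the X-position scan, as a named function for the proofs
def xidxF (n : Nat) (l : List String) : List Nat :=
  (l.zipIdx n).filterMap (fun p => if p.1 = "X" then some p.2 else none)

theorem xidxF_append (pre t : List String) (hpre : "X" ∉ pre) (n : Nat) :
    xidxF n (pre ++ t) = xidxF (n + pre.length) t := by
  induction pre generalizing n with
  | nil => simp
  | cons a p ih =>
      have ha : a ≠ "X" := fun hx => hpre (hx ▸ List.mem_cons_self)
      simp only [List.cons_append, xidxF, List.zipIdx_cons, List.filterMap_cons, if_neg ha]
      have := ih (fun hx => hpre (List.mem_cons_of_mem _ hx)) (n + 1)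
      simp only [xidxF] at this
      rw [this, show n + 1 + p.length = n + (a :: p).length by simp only [List.length_cons]; omega]

theorem xidxF_of_not_mem (l : List String) (h : "X" ∉ l) (n : Nat) : xidxF n l = [] := by
  induction l generalizing n with
  | nil => rfl
  | cons a t ih =>
      have ha : a ≠ "X" := fun hx => h (hx ▸ List.mem_cons_self)
      simp only [xidxF, List.zipIdx_cons, List.filterMap_cons, if_neg ha]
      exact ih (fun hx => h (List.mem_cons_of_mem _ hx)) (n + 1)

-- a bit of m and of 2^k + m agree below position k
theorem bit_add_pow (k m s : Nat) (hs : s < k) : ((2 ^ k + m) >>> s) % 2 = (m >>> s) % 2 := by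
  rw [Nat.shiftRight_eq_div_pow, Nat.shiftRight_eq_div_pow]
  have h1 : 2 ^ k = 2 ^ s * 2 ^ (k - s) := by rw [← pow_add]; congr 1; omega
  rw [h1, Nat.add_comm, Nat.add_mul_div_left _ _ (by positivity : (0:ℕ) < 2 ^ s)]
  have h2 : 2 ^ (k - s) % 2 = 0 := by
    have hks : k - s = (k - s - 1) + 1 := by omega
    rw [hks, pow_succ]; omega
  omega

-- renumbering the enumeration start by one equals lowering the shift base by one
theorem foldl_zipIdx_shift (S : List Nat) (k m : Nat) : ∀ (n : Nat) (base : List String),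
    (S.zipIdx (n + 1)).foldl (fun cur p => cur.set p.1 (if (m >>> (k - p.2)) % 2 = 1 then "1" else "0")) base
      = (S.zipIdx n).foldl (fun cur p => cur.set p.1 (if (m >>> (k - 1 - p.2)) % 2 = 1 then "1" else "0")) base := by
  induction S with
  | nil => intro n base; rfl
  | cons j S ih =>
      intro n base
      simp only [List.zipIdx_cons, List.foldl_cons]
      rw [ih (n + 1)]
      have hsh : k - (n + 1) = k - 1 - n := by omega
      simp only [hsh]

theorem assign_cons_low (l : List String) (i : Nat) (S : List Nat) (m : Nat) (hm : m < 2 ^ S.length) :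
    assignBits l (i :: S) (S.length + 1) m = assignBits (l.set i "0") S S.length m := by
  unfold assignBits
  simp only [List.zipIdx_cons, List.foldl_cons]
  have h0 : m >>> S.length = 0 := by
    rw [Nat.shiftRight_eq_div_pow]
    exact Nat.div_eq_of_lt hm
  norm_num [h0]
  exact foldl_zipIdx_shift S S.length m 0 (l.set i "0")

theorem assign_cons_high (l : List String) (i : Nat) (S : List Nat) (m : Nat) (hm : m < 2 ^ S.length) :
    assignBits l (i :: S) (S.length + 1) (2 ^ S.length + m) = assignBits (l.set i "1") S S.length m := by
  unfold assignBits
  simp only [List.zipIdx_cons, List.foldl_cons]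
  have h1 : (2 ^ S.length + m) >>> S.length = 1 := by
    rw [Nat.shiftRight_eq_div_pow]
    rw [Nat.add_comm, Nat.add_div_right _ (by positivity : (0:ℕ) < 2 ^ S.length),
      Nat.div_eq_of_lt hm]
  norm_num [h1]
  have hmid : (S.zipIdx 1).foldl
        (fun cur p => cur.set p.1 (if ((2 ^ S.length + m) >>> (S.length - p.2)) % 2 = 1 then "1" else "0"))
        (l.set i "1")
      = (S.zipIdx 1).foldl
        (fun cur p => cur.set p.1 (if (m >>> (S.length - p.2)) % 2 = 1 then "1" else "0"))
        (l.set i "1") := by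
    apply PySem.List.foldl_congr_mem
    intro acc x hx
    obtain ⟨x1, x2⟩ := x
    have hb := List.mem_zipIdx hx
    have hx2 : 1 ≤ x2 ∧ x2 < 1 + S.length := ⟨hb.1, hb.2.1⟩
    have : ((2 ^ S.length + m) >>> (S.length - x2)) % 2 = (m >>> (S.length - x2)) % 2 :=
      bit_add_pow S.length m (S.length - x2) (by omega)
    rw [this]
  rw [hmid]
  exact foldl_zipIdx_shift S S.length m 0 (l.set i "1")

theorem main_equiv (l : List String) : findAddresses l = findAddresses_alt l := by
  suffices h : ∀ n l, l.count "X" = n → findAddresses l = findAddresses_alt l from h _ l rfl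
  intro n
  induction n using Nat.strong_induction_on with
  | _ n IH =>
    intro l hn
    rw [findAddresses]
    by_cases hmem : "X" ∈ l
    · rw [if_pos hmem]
      split
      case h_2 hnone => exact absurd ((PySem.List.index?_eq_none_iff _ _).1 hnone) (by simpa using hmem)
      case h_1 i hi =>
        obtain ⟨pre, suf, rfl, rfl, hpre⟩ := (PySem.List.index?_eq_some_iff _ _ _).1 hi
        have hc0 := count_set_of_index? hi "0" (by decide)
        have hc1 := count_set_of_index? hi "1" (by decide)
        have hset : ∀ b : String, (pre ++ "X" :: suf).set pre.length b = pre ++ b :: suf := by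
          intro b; simp
        rw [hset "0"] at hc0
        rw [hset "1"] at hc1
        -- X positions of the three lists
        have hS0 : xidxF 0 (pre ++ "0" :: suf) = xidxF (pre.length + 1) suf := by
          rw [xidxF_append pre _ hpre 0]
          simp [xidxF, List.zipIdx_cons]
        have hS1 : xidxF 0 (pre ++ "1" :: suf) = xidxF (pre.length + 1) suf := by
          rw [xidxF_append pre _ hpre 0]
          simp [xidxF, List.zipIdx_cons]
        have hSX : xidxF 0 (pre ++ "X" :: suf) = pre.length :: xidxF (pre.length + 1) suf := by
          rw [xidxF_append pre _ hpre 0]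
          simp [xidxF, List.zipIdx_cons]
        set S := xidxF (pre.length + 1) suf with hSdef
        -- A recurses on strictly smaller counts
        have hA0 : findAddresses (pre ++ "0" :: suf) = findAddresses_alt (pre ++ "0" :: suf) :=
          IH _ (by omega) _ rfl
        have hA1 : findAddresses (pre ++ "1" :: suf) = findAddresses_alt (pre ++ "1" :: suf) :=
          IH _ (by omega) _ rfl
        show findAddresses ((pre ++ "X" :: suf).set pre.length "0")
            ++ findAddresses ((pre ++ "X" :: suf).set pre.length "1")
            = findAddresses_alt (pre ++ "X" :: suf)
        rw [hset "0", hset "1", hA0, hA1]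
        simp only [findAddresses_alt]
        simp only [xidxF] at hS0 hS1 hSX hSdef
        rw [hS0, hS1, hSX]
        simp only [List.length_cons]
        rw [show 2 ^ (S.length + 1) = 2 ^ S.length + 2 ^ S.length by rw [pow_succ]; omega]
        rw [List.range_add, List.map_append, List.map_map]
        congr 1
        · apply List.map_congr_left
          intro m hm
          rw [assign_cons_low _ _ _ _ (List.mem_range.1 hm), hset "0"]
        · apply List.map_congr_left
          intro m hm
          simp only [Function.comp]
          rw [assign_cons_high _ _ _ _ (List.mem_range.1 hm), hset "1"]
    · rw [if_neg hmem]
      show _ = findAddresses_alt l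
      unfold findAddresses_alt
      have h0 : xidxF 0 l = [] := xidxF_of_not_mem l hmem 0
      simp only [xidxF] at h0
      rw [h0]
      rfl

-- ===== VERDICT (by name: the statement is the Claim_ definition above) =====
theorem findAddresses_spec : Claim_equal_findAddresses := by
  intro l _ _
  exact main_equiv l
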